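-- pv_equiv track=rewrite | github.com/dexeme/boolean-functions-wiki | docs/_ext/lazy_chunks.py | _csv_chunk_meta
-- ===== SOURCE A (Python) =====
-- def _csv_chunk_meta(rows: list[list[str]], max_rows: int) -> list[tuple[int, int, str, str]]:
--     chunks: list[tuple[int, int, str, str]] = []
--     if max_rows <= 0:
--         return chunks
--     total = len(rows)
--     for idx in range(0, total, max_rows):
--         chunk_rows = rows[idx:idx + max_rows]
--         start = idx + 1
--         end = idx + len(chunk_rows)
--         first_id = chunk_rows[0][0].strip() if chunk_rows and chunk_rows[0] else str(start)
--         last_id = chunk_rows[-1][0].strip() if chunk_rows and chunk_rows[-1] else str(end)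
--         chunks.append((start, end, first_id, last_id))
--     return chunks
-- ===== SOURCE B (Python) =====
-- def _csv_chunk_meta(rows: list[list[str]], max_rows: int) -> list[tuple[int, int, str, str]]:
--     if max_rows <= 0:
--         return []
--
--     def go(rest, offset):
--         if not rest:
--             return []
--         head = rest[:max_rows]
--         tail = rest[max_rows:]
--         start = offset + 1
--         end = offset + len(head)
--         first_id = head[0][0].strip() if head[0] else str(start)
--         last_id = head[-1][0].strip() if head[-1] else str(end)
--         return [(start, end, first_id, last_id)] + go(tail, end)
--
--     return go(rows, 0)
-- ===== Notes on version B (the rewrite author's own statement) =====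
-- stated objective: alternative
-- what changed: Replaces the strided range(0,total,max_rows) loop with index-based slicing of the full list by a recursion that repeatedly splits off the first max_rows rows and threads the running offset.
import Mathlib
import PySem

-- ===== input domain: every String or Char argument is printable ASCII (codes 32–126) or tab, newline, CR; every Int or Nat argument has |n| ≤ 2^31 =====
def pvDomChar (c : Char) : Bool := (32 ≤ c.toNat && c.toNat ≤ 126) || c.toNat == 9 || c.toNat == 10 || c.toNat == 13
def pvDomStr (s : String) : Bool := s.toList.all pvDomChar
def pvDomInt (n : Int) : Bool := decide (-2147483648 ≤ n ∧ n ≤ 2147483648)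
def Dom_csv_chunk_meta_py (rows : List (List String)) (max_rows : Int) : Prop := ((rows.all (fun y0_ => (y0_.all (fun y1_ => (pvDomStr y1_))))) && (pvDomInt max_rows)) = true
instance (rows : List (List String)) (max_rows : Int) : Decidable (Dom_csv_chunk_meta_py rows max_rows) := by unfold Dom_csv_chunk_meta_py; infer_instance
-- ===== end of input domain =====

-- B replaces A's strided-index loop that slices the full list with a recursion that
-- splits off the first max_rows rows each step (a different decomposition, same cost).


-- ===== PORT A =====
def csv_chunk_meta_py (rows : List (List String)) (max_rows : Int) : List (Int × Int × String × String) :=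
  if max_rows ≤ 0 then []
  else
    let total : Int := rows.length
    (PySem.List.pyRange 0 total max_rows).foldl
      (fun chunks idx =>
        let chunk_rows := PySem.List.slice rows (some idx) (some (idx + max_rows))
        let start := idx + 1
        let stop := idx + (chunk_rows.length : Int)
        -- 'chunk_rows and chunk_rows[0]' guards chunk_rows[0][0].strip(), else str(start)
        let first_id :=
          match chunk_rows.head? with
          | some (c :: _) => PySem.Str.strip c
          | _ => PySem.Int.toStr start
        -- 'chunk_rows and chunk_rows[-1]' guards chunk_rows[-1][0].strip(), else str(end)
        let last_id :=
          match chunk_rows.getLast? with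
          | some (c :: _) => PySem.Str.strip c
          | _ => PySem.Int.toStr stop
        chunks ++ [(start, stop, first_id, last_id)])
      []

-- ===== PORT B =====
-- Source B's inner 'go'; the fuel argument (started at rows.length) only makes the
-- recursion total in Lean — with max_rows ≥ 1 it is never exhausted.
def csvChunkGo (m : Nat) : Nat → List (List String) → Int → List (Int × Int × String × String)
  | _, [], _ => []
  | 0, _ :: _, _ => []
  | fuel + 1, r :: rs, offset =>
    let head := (r :: rs).take m          -- rest[:max_rows]
    let tail := (r :: rs).drop m          -- rest[max_rows:]
    let start := offset + 1
    let stop := offset + (head.length : Int)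
    let first_id :=
      match head.head? with
      | some (c :: _) => PySem.Str.strip c
      | some [] => PySem.Int.toStr start
      | none => PySem.Int.toStr start
    let last_id :=
      match head.getLast? with
      | some (c :: _) => PySem.Str.strip c
      | some [] => PySem.Int.toStr stop
      | none => PySem.Int.toStr stop
    (start, stop, first_id, last_id) :: csvChunkGo m fuel tail stop

def csv_chunk_meta_py_alt (rows : List (List String)) (max_rows : Int) : List (Int × Int × String × String) :=
  if max_rows ≤ 0 then []
  else csvChunkGo max_rows.toNat rows.length rows 0

-- ===== PRECONDITION & SPEC =====
def Spec_csv_chunk_meta_py (rows : List (List String)) (max_rows : Int) (out : List (Int × Int × String × String)) : Prop := out = csv_chunk_meta_py_alt rows max_rows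
instance (rows : List (List String)) (max_rows : Int) (out : List (Int × Int × String × String)) : Decidable (Spec_csv_chunk_meta_py rows max_rows out) := by unfold Spec_csv_chunk_meta_py; infer_instance

-- ===== CLAIM (what is proved, stated in full; the proofs are below) =====
def Claim_equal_csv_chunk_meta_py : Prop := ∀ (rows : List (List String)) (max_rows : Int), Dom_csv_chunk_meta_py rows max_rows → Spec_csv_chunk_meta_py rows max_rows (csv_chunk_meta_py rows max_rows)

-- ===== LEMMAS AND PROOFS =====

-- the per-chunk record both ports build, as a function of the chunk list and its offset
def entryB (head : List (List String)) (ofs : Int) : Int × Int × String × String :=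
  let start := ofs + 1
  let stop := ofs + (head.length : Int)
  let first_id :=
    match head.head? with
    | some (c :: _) => PySem.Str.strip c
    | some [] => PySem.Int.toStr start
    | none => PySem.Int.toStr start
  let last_id :=
    match head.getLast? with
    | some (c :: _) => PySem.Str.strip c
    | some [] => PySem.Int.toStr stop
    | none => PySem.Int.toStr stop
  (start, stop, first_id, last_id)

theorem portA_foldl (rows : List (List String)) (max_rows : Int) :
    csv_chunk_meta_py rows max_rows =
      if max_rows ≤ 0 then []
      else (PySem.List.pyRange 0 (rows.length : Int) max_rows).foldl
        (fun chunks idx =>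
          chunks ++ [entryB (PySem.List.slice rows (some idx) (some (idx + max_rows))) idx]) [] := by
  unfold csv_chunk_meta_py
  by_cases h : max_rows ≤ 0
  · simp [h]
  · rw [if_neg h, if_neg h]
    apply PySem.List.foldl_congr_mem
    intro acc idx _
    simp only [entryB]
    rcases (PySem.List.slice rows (some idx) (some (idx + max_rows))).head? with _ | (_ | ⟨c, cs⟩) <;>
      rcases (PySem.List.slice rows (some idx) (some (idx + max_rows))).getLast? with _ | (_ | ⟨d, ds⟩) <;>
        simp

theorem goB_cons (n f : Nat) (r : List String) (rs : List (List String)) (ofs : Int) :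
    csvChunkGo n (f + 1) (r :: rs) ofs =
      entryB ((r :: rs).take n) ofs ::
        csvChunkGo n f ((r :: rs).drop n) (ofs + (((r :: rs).take n).length : Int)) := rfl

theorem pyRange_pos_nil (a b s : Int) (hs : 0 < s) (hab : b ≤ a) :
    PySem.List.pyRange a b s = [] := by
  rw [PySem.List.pyRange_of_pos _ _ hs, if_neg (by omega)]
  simp

theorem pyRange_pos_cons (a b s : Int) (hs : 0 < s) (hab : a < b) :
    PySem.List.pyRange a b s = a :: PySem.List.pyRange (a + s) b s := by
  rw [PySem.List.pyRange_of_pos _ _ hs, PySem.List.pyRange_of_pos _ _ hs, if_pos hab]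
  have hc : (0:Int) ≤ b - a - 1 := by omega
  have h1 : b - a + s - 1 = (b - a - 1) + 1 * s := by ring
  have h2 : (b - a + s - 1) / s = (b - a - 1) / s + 1 := by
    rw [h1, Int.add_mul_ediv_right _ _ (by omega)]
  have hd0 : (0:Int) ≤ (b - a - 1) / s := Int.ediv_nonneg hc (le_of_lt hs)
  have h3 : ((b - a + s - 1) / s).toNat = ((b - a - 1) / s).toNat + 1 := by omega
  rw [h3, List.range_succ_eq_map]
  by_cases hab2 : a + s < b
  · rw [if_pos hab2]
    have h4 : b - (a + s) + s - 1 = b - a - 1 := by ring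
    rw [h4]
    simp only [List.map_cons, List.map_map]
    congr 1
    · push_cast; ring
    · apply List.map_congr_left
      intro k _
      simp only [Function.comp_apply]
      push_cast
      ring
  · rw [if_neg hab2]
    have : (b - a - 1) / s = 0 := Int.ediv_eq_zero_of_lt hc (by omega)
    rw [this]
    simp

theorem csv_chunk_main (m : Int) (hm : 0 < m) (rows : List (List String)) :
    ∀ (fuel k : Nat) (acc : List (Int × Int × String × String)),
      (rows.drop k).length ≤ fuel →
      (PySem.List.pyRange (k : Int) (rows.length : Int) m).foldl
        (fun chunks idx => chunks ++ [entryB (PySem.List.slice rows (some idx) (some (idx + m))) idx]) acc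
      = acc ++ csvChunkGo m.toNat fuel (rows.drop k) (k : Int) := by
  intro fuel
  induction fuel with
  | zero =>
    intro k acc hf
    have hnil : rows.drop k = [] := by
      cases h : rows.drop k with
      | nil => rfl
      | cons a l => rw [h] at hf; simp at hf
    have hk : rows.length ≤ k := by
      have := congrArg List.length hnil
      simp at this; omega
    rw [hnil, pyRange_pos_nil _ _ _ hm (by exact_mod_cast hk)]
    simp [csvChunkGo]
  | succ f ih =>
    intro k acc hf
    by_cases hk : rows.length ≤ k
    · have hnil : rows.drop k = [] := List.drop_eq_nil_of_le hk
      rw [hnil, pyRange_pos_nil _ _ _ hm (by exact_mod_cast hk)]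
      simp [csvChunkGo]
    · push Not at hk
      obtain ⟨r, rs, hd⟩ := List.exists_cons_of_ne_nil
        (by rw [← List.length_pos_iff]; rw [List.length_drop]; omega : rows.drop k ≠ [])
      set n := m.toNat with hn
      have hnm : (n : Int) = m := Int.toNat_of_nonneg (le_of_lt hm)
      have hn1 : 1 ≤ n := by omega
      have hslice : PySem.List.slice rows (some (k : Int)) (some ((k : Int) + m)) = (rows.drop k).take n := by
        rw [← hnm, PySem.List.slice_natCast_add]
      rw [pyRange_pos_cons _ _ _ hm (by exact_mod_cast hk), List.foldl_cons]
      by_cases hlast : (rows.drop k).length ≤ n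
      · -- final (possibly partial) chunk: the remaining range and the remaining rows are both empty
        have htail : (rows.drop k).drop n = [] := List.drop_eq_nil_of_le hlast
        have hfull : (rows.drop k).take n = rows.drop k := List.take_of_length_le hlast
        have hlen : rows.length ≤ (k : Int) + m := by
          rw [← hnm]; rw [List.length_drop] at hlast; omega
        rw [pyRange_pos_nil _ _ _ hm hlen]
        simp only [List.foldl_nil]
        rw [hd, goB_cons, ← hd, htail]
        rw [hslice, hfull]
        simp [csvChunkGo]
      · push Not at hlast
        have htake : ((rows.drop k).take n).length = n := by
          rw [List.length_take]; omega
        have htail : (rows.drop k).drop n = rows.drop (k + n) := by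
          rw [List.drop_drop]
        have hih := ih (k + n) (acc ++ [entryB ((rows.drop k).take n) (k : Int)])
          (by rw [List.length_drop] at *; omega)
        rw [hd, goB_cons, ← hd, htail, htake]
        rw [hslice]
        have hcast : ((k : Int) + m) = ((k + n : Nat) : Int) := by push_cast; omega
        rw [hcast]
        rw [hih]
        simp [hnm]

-- ===== VERDICT (by name: the statement is the Claim_ definition above) =====
theorem csv_chunk_meta_py_spec : Claim_equal_csv_chunk_meta_py := by
  intro rows max_rows _
  unfold Spec_csv_chunk_meta_py
  rw [portA_foldl]
  unfold csv_chunk_meta_py_alt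
  by_cases h : max_rows ≤ 0
  · simp [h]
  · rw [if_neg h, if_neg h]
    have := csv_chunk_main max_rows (by omega) rows rows.length 0 [] (by simp)
    simpa using this
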